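-- pv_equiv track=rewrite | github.com/pkivolowitz/lifx | server.py | _days_display
-- ===== SOURCE A (Python) =====
-- VALID_DAY_LETTERS: str = "MTWRFSU"
--
-- def _days_display(days_str: str) -> str:
--     """Format a days string for human display.
--
--     Returns smart labels for common patterns, otherwise the
--     letter string itself.
--
--     Args:
--         days_str: Day letter string (e.g. ``"MTWRF"``).
--
--     Returns:
--         A display string like ``"Weekdays"``, ``"Weekends"``, ``"Daily"``,
--         or the sorted letter string.
--     """
--     if not days_str:
--         return "Daily"
--     upper: str = days_str.upper()
--     # Sort into canonical order.
--     canonical: str = "".join(ch for ch in VALID_DAY_LETTERS if ch in upper)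
--     if canonical == VALID_DAY_LETTERS:
--         return "Daily"
--     if canonical == "MTWRF":
--         return "Weekdays"
--     if canonical == "SU":
--         return "Weekends"
--     return canonical
-- ===== SOURCE B (Python) =====
-- VALID_DAY_LETTERS: str = "MTWRFSU"
--
-- # Label table for the recognised patterns.
-- _LABELS = {"MTWRFSU": "Daily", "MTWRF": "Weekdays", "SU": "Weekends"}
--
--
-- def _days_display(days_str: str) -> str:
--     """Collect the valid letters of the input into a set, sort them by
--     their canonical position, and look the result up in a label table."""
--     if not days_str:
--         return "Daily"
--     present = {ch for ch in days_str.upper() if ch in VALID_DAY_LETTERS}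
--     canonical = "".join(sorted(present, key=VALID_DAY_LETTERS.index))
--     return _LABELS.get(canonical, canonical)
-- ===== Notes on version B (the rewrite author's own statement) =====
-- stated objective: alternative
-- what changed: A builds the canonical string by filtering the constant VALID_DAY_LETTERS with a substring test per letter and recognises patterns by an if-chain of string comparisons; B traverses the uppercased input collecting the valid letters into a set, sorts the set by canonical position, and maps the result through a label lookup table.
import Mathlib
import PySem

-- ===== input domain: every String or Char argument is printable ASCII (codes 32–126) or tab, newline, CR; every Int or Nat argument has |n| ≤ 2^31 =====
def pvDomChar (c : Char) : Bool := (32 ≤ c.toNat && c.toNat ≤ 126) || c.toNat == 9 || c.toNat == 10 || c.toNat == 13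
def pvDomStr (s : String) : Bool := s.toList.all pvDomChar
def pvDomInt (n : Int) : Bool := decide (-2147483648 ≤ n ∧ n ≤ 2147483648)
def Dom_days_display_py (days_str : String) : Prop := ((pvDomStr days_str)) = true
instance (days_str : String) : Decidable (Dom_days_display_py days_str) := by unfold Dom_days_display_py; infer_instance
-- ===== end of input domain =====

-- B collects the input's valid letters into a set, sorts them by canonical position and
-- looks the result up in a label table, instead of A's filter of the constant plus an
-- if-chain; an alternative decomposition, same asymptotic cost.

-- ===== PORT A =====
-- VALID_DAY_LETTERS = "MTWRFSU" (as a character list)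
def validLetters : List Char := ['M', 'T', 'W', 'R', 'F', 'S', 'U']

def days_display_py (days_str : String) : String :=
  if days_str = "" then "Daily"
  else
    let upper : String := PySem.Str.upper days_str
    -- "".join(ch for ch in VALID_DAY_LETTERS if ch in upper)
    let canonical : String :=
      String.ofList (validLetters.filter (fun ch => PySem.Str.isIn (String.ofList [ch]) upper))
    if canonical = "MTWRFSU" then "Daily"
    else if canonical = "MTWRF" then "Weekdays"
    else if canonical = "SU" then "Weekends"
    else canonical

-- ===== PORT B =====
-- _LABELS = {"MTWRFSU": "Daily", "MTWRF": "Weekdays", "SU": "Weekends"}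
def labelTable : PySem.Dict String String :=
  PySem.Dict.mk [("MTWRFSU", "Daily"), ("MTWRF", "Weekdays"), ("SU", "Weekends")]

-- VALID_DAY_LETTERS.index(ch); getD 0 is exact here because it is only called on
-- characters already tested to be members of validLetters (no ValueError reachable).
def dayIndex (ch : Char) : Nat := (PySem.List.index? validLetters ch).getD 0

def days_display_py_alt (days_str : String) : String :=
  if days_str = "" then "Daily"
  else
    -- {ch for ch in days_str.upper() if ch in VALID_DAY_LETTERS}
    let present : PySem.Set Char :=
      PySem.Set.ofList ((PySem.Str.upper days_str).toList.filter
        (fun ch => PySem.Chars.isIn [ch] validLetters))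
    -- "".join(sorted(present, key=VALID_DAY_LETTERS.index))
    let canonical : String := String.ofList (PySem.List.sorted present dayIndex false)
    labelTable.getD canonical canonical

-- ===== PRECONDITION & SPEC =====
def Spec_days_display_py (days_str : String) (out : String) : Prop := out = days_display_py_alt days_str
instance (days_str : String) (out : String) : Decidable (Spec_days_display_py days_str out) := by unfold Spec_days_display_py; infer_instance

-- ===== CLAIM (what is proved, stated in full; the proofs are below) =====
def Claim_equal_days_display_py : Prop := ∀ (days_str : String), Dom_days_display_py days_str → Spec_days_display_py days_str (days_display_py days_str)

-- ===== LEMMAS AND PROOFS =====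

-- single-character membership test 'c in s' is the same as List.contains
lemma charIn (c : Char) (l : List Char) : PySem.Chars.isIn [c] l = l.contains c := by
  by_cases h : c ∈ l
  · rw [(PySem.Chars.isIn_iff_infix [c] l).mpr ((List.singleton_infix_iff c l).mpr h)]
    simp [h]
  · rw [(PySem.Chars.isIn_eq_false_iff [c] l).mpr (fun hi => h ((List.singleton_infix_iff c l).mp hi))]
    simp [h]

-- the table lookup in B equals the if-chain in A, for any string
lemma label_lookup (s : String) :
    labelTable.getD s s =
      (if s = "MTWRFSU" then "Daily"
       else if s = "MTWRF" then "Weekdays"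
       else if s = "SU" then "Weekends"
       else s) := by
  simp only [labelTable, PySem.Dict.getD_eq_get?_getD, PySem.Dict.get?_mk_cons, beq_iff_eq]
  by_cases h1 : s = "MTWRFSU" <;> by_cases h2 : s = "MTWRF" <;> by_cases h3 : s = "SU" <;>
    simp [h1, h2, h3, eq_comm, PySem.Dict.get?]

-- B's sorted deduped valid letters ARE A's filter of the constant in canonical order
lemma canonical_agree (cs : List Char) :
    PySem.List.sorted
        (PySem.Set.ofList (cs.filter (fun ch => PySem.Chars.isIn [ch] validLetters)))
        dayIndex false
      = validLetters.filter (fun ch => PySem.Chars.isIn [ch] cs) := by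
  apply PySem.List.sorted_eq_of_perm_of_pairwise_lt
  · -- the two lists are permutations: both nodup, same membership
    rw [List.perm_ext_iff_of_nodup
        (List.Nodup.filter _ (by decide : validLetters.Nodup))
        (PySem.Set.nodup_ofList _)]
    intro c
    simp only [List.mem_filter, PySem.Set.mem_ofList, charIn, List.contains_iff_mem]
    tauto
  · -- the filter of validLetters is strictly increasing under dayIndex
    exact List.Pairwise.sublist List.filter_sublist
      (by decide : validLetters.Pairwise (fun a b => dayIndex a < dayIndex b))

-- ===== VERDICT (by name: the statement is the Claim_ definition above) =====
theorem days_display_py_spec : Claim_equal_days_display_py := by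
  intro days_str _
  unfold Spec_days_display_py days_display_py days_display_py_alt
  by_cases h : days_str = ""
  · simp [h]
  · simp only [h, if_false]
    rw [show (fun ch => PySem.Str.isIn (String.ofList [ch]) (PySem.Str.upper days_str))
        = (fun ch => PySem.Chars.isIn [ch] (PySem.Str.upper days_str).toList) from
        funext (fun ch => by simp [PySem.Str.isIn_eq, String.toList_ofList])]
    rw [canonical_agree, label_lookup]
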